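-- pv_equiv track=rewrite | github.com/FacundoOZ/University-of-Buenos-Aires | MSc-in-Computer-Science/Algoritmos 1/trabajo_práctico/buscaminas.py | chequeo_dimensiones
-- ===== SOURCE A (Python) =====
-- def contar_columnas(linea: str) -> int:
--   """
--   Devuelve la cantidad de columnas que debe de tener el tablero.
--   Args:
--     linea: str. Linea de texto para chequear.
--   """
--   res: int = 1 # Inicializamos en 1, ya que la cantidad de ',' es una menos que la cantidad de columnas en una fila.
--   i: int   = 0
--   while i < len(linea):
--     if linea[i] == ',':
--       res += 1
--     i += 1
--   return res
--
-- def chequeo_dimensiones(tablero: list[list[str]], tablero_visible: list[list[str]]) -> bool: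
--   """
--   Verifica que ambos tableros coincidan a como tendrian que ser.
--   Args:
--     tablero: list[list[str]]. matriz con minas (-1) y casillas con numeros del 0 al 8.
--     tablero_visible: list[list[str]]. matriz con los elementos VACIO, BANDERA o BOMBA.
--   Returns:
--     bool:  True si ambos tableros tienen las mismas dimensiones y que no esten vacios. False en caso contrario.
--   """
--   if len(tablero) != len(tablero_visible) or len(tablero) == 0: # Si las longitudes son distintas ó son iguales a 0 => no puedo cargar estado.
--     return False
--   columnas: int = contar_columnas(tablero[0])
--   i: int = 0
--   while i < len(tablero): # verificamos que todas las filas de ambos archivos tengan la misma cantidad de columnas.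
--     if contar_columnas(tablero[i]) != columnas:
--       return False
--     if contar_columnas(tablero_visible[i]) != columnas:
--       return False
--     i += 1
--   return True
-- ===== SOURCE B (Python) =====
-- def chequeo_dimensiones(tablero: list, tablero_visible: list) -> bool:
--   anchos = {fila.count(',') + 1 for fila in tablero + tablero_visible}
--   return len(tablero) == len(tablero_visible) and len(tablero) > 0 and len(anchos) == 1
-- ===== Notes on version B (the rewrite author's own statement) =====
-- stated objective: idiomatic
-- what changed: Replaces the reference-row plus per-row char-scanning comparison loop with one set comprehension collecting every row's width (fila.count(',')+1) over both boards and a cardinality-1 check.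
import Mathlib
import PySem

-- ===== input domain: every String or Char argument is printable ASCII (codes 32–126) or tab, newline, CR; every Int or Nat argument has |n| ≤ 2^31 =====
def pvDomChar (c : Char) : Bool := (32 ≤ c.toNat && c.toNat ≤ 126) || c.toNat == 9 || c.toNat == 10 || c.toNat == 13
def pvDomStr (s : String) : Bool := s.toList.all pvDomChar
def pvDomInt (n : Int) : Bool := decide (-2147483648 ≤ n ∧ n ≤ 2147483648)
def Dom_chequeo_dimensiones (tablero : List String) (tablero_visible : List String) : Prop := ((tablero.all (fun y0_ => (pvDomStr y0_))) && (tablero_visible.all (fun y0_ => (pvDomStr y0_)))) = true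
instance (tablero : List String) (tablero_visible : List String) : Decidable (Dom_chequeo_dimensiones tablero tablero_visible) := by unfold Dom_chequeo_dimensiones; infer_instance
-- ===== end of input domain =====

-- B replaces A's reference-row + per-row comparison loop by collecting all row widths of
-- both boards into one set and checking its cardinality is 1 (idiomatic; same asymptotic cost).

-- ===== PORT A =====
-- while i < len(linea): if linea[i] == ',': res += 1
def contarAux : List Char → Int → Int
  | [], res => res
  | c :: rest, res => contarAux rest (if c = ',' then res + 1 else res)

def contar_columnas (linea : String) : Int := contarAux linea.toList 1

-- the while loop over i with tablero[i] / tablero_visible[i]; only reached when both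
-- lists have equal length, so it is the simultaneous recursion on the two lists
def chequeoLoop (columnas : Int) : List String → List String → Bool
  | [], _ => true
  | _ :: _, [] => true
  | a :: as, b :: bs =>
      if contar_columnas a ≠ columnas then false
      else if contar_columnas b ≠ columnas then false
      else chequeoLoop columnas as bs

def chequeo_dimensiones (tablero : List String) (tablero_visible : List String) : Bool :=
  if tablero.length ≠ tablero_visible.length ∨ tablero.length = 0 then false
  else
    match tablero with
    | [] => true  -- unreachable under the guard
    | f :: _ => chequeoLoop (contar_columnas f) tablero tablero_visible

-- ===== PORT B =====
def chequeo_dimensiones_alt (tablero : List String) (tablero_visible : List String) : Bool :=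
  let anchos : PySem.Set Int :=
    PySem.Set.ofList ((tablero ++ tablero_visible).map (fun fila => (PySem.Str.count fila "," : Int) + 1))
  (tablero.length == tablero_visible.length) && (tablero.length > 0) && (PySem.Set.len anchos == 1)

-- ===== PRECONDITION & SPEC =====
def Spec_chequeo_dimensiones (tablero : List String) (tablero_visible : List String) (out : Bool) : Prop := out = chequeo_dimensiones_alt tablero tablero_visible
instance (tablero : List String) (tablero_visible : List String) (out : Bool) : Decidable (Spec_chequeo_dimensiones tablero tablero_visible out) := by unfold Spec_chequeo_dimensiones; infer_instance

-- ===== CLAIM (what is proved, stated in full; the proofs are below) =====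
def Claim_equal_chequeo_dimensiones : Prop := ∀ (tablero : List String) (tablero_visible : List String), Dom_chequeo_dimensiones tablero tablero_visible → Spec_chequeo_dimensiones tablero tablero_visible (chequeo_dimensiones tablero tablero_visible)

-- ===== LEMMAS AND PROOFS =====

-- A's char scan counts commas
lemma contarAux_eq (l : List Char) (res : Int) : contarAux l res = res + l.count ',' := by
  induction l generalizing res with
  | nil => simp [contarAux]
  | cons c t ih =>
    by_cases h : c = ','
    · simp [contarAux, h, ih]; ring
    · simp [contarAux, h, ih]

-- B's fila.count(',') is the comma count (single-char pattern)
lemma count_go_single (c : Char) (l : List Char) : ∀ (fuel acc : Nat), l.length ≤ fuel →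
    PySem.Chars.count.go [c] fuel l acc = acc + l.count c := by
  induction l with
  | nil => intro fuel acc _; cases fuel <;> simp [PySem.Chars.count.go]
  | cons h t ih =>
    intro fuel acc hf
    cases fuel with
    | zero => simp at hf
    | succ f =>
      by_cases hc : c = h
      · subst hc
        have hstep : PySem.Chars.count.go [c] (f + 1) (c :: t) acc
            = PySem.Chars.count.go [c] f t (acc + 1) := by
          simp [PySem.Chars.count.go, List.isPrefixOf]
        rw [hstep, ih f (acc + 1) (by simpa using hf), List.count_cons]
        simp; omega
      · have hstep : PySem.Chars.count.go [c] (f + 1) (h :: t) acc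
            = PySem.Chars.count.go [c] f t acc := by
          simp [PySem.Chars.count.go, List.isPrefixOf, hc]
        rw [hstep, ih f acc (by simpa using hf), List.count_cons]
        simp [Ne.symm hc]

lemma chars_count_single (c : Char) (l : List Char) : PySem.Chars.count l [c] = l.count c := by
  simp [PySem.Chars.count, count_go_single c l l.length 0 le_rfl]

-- both width computations agree
lemma contar_eq_width (s : String) :
    contar_columnas s = (PySem.Str.count s "," : Int) + 1 := by
  simp [contar_columnas, contarAux_eq, PySem.Str.count, chars_count_single]
  omega

-- A's loop is an all-rows width check (for equal-length boards)
lemma chequeoLoop_eq (cols : Int) (as bs : List String) (h : as.length = bs.length) :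
    chequeoLoop cols as bs
      = (as.all (fun a => contar_columnas a == cols) && bs.all (fun b => contar_columnas b == cols)) := by
  induction as generalizing bs with
  | nil =>
    cases bs with
    | nil => simp [chequeoLoop]
    | cons b bs => simp at h
  | cons a as ih =>
    cases bs with
    | nil => simp at h
    | cons b bs =>
      simp only [List.length_cons, Nat.add_right_cancel_iff] at h
      by_cases ha : contar_columnas a = cols
      · by_cases hb : contar_columnas b = cols
        · simp [chequeoLoop, ha, hb, ih bs h]
        · simp [chequeoLoop, ha, hb]
      · simp [chequeoLoop, ha]

-- a set built from a nonempty list is a singleton iff all elements equal the head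
lemma ofList_len_one_iff (w : Int) (rest : List Int) :
    (PySem.Set.ofList (w :: rest)).length = 1 ↔ ∀ x ∈ rest, x = w := by
  rw [PySem.Set.ofList_cons]
  constructor
  · intro h x hx
    have hlen : (PySem.Set.discard (PySem.Set.ofList rest) w).length = 0 := by
      simpa using h
    have hnil : PySem.Set.discard (PySem.Set.ofList rest) w = [] :=
      List.eq_nil_of_length_eq_zero hlen
    by_contra hne
    have : x ∈ PySem.Set.discard (PySem.Set.ofList rest) w := by
      rw [PySem.Set.mem_discard, PySem.Set.mem_ofList]
      exact ⟨hx, hne⟩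
    rw [hnil] at this; simp at this
  · intro h
    have hnil : PySem.Set.discard (PySem.Set.ofList rest) w = [] := by
      rw [List.eq_nil_iff_forall_not_mem]
      intro x hx
      rw [PySem.Set.mem_discard, PySem.Set.mem_ofList] at hx
      exact hx.2 (h x hx.1)
    simp [hnil]

-- ===== VERDICT (by name: the statement is the Claim_ definition above) =====
theorem chequeo_dimensiones_spec : Claim_equal_chequeo_dimensiones := by
  intro t tv _
  unfold Spec_chequeo_dimensiones chequeo_dimensiones chequeo_dimensiones_alt
  by_cases hlen : t.length = tv.length
  · by_cases h0 : t.length = 0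
    · have ht : t = [] := List.eq_nil_of_length_eq_zero h0
      subst ht
      have htv : tv = [] := List.eq_nil_of_length_eq_zero hlen.symm
      subst htv
      rfl
    · match t, h0 with
      | f :: ts, _ =>
        have hlen' : (f :: ts).length = tv.length := hlen
        have htvne : tv ≠ [] := by intro h; subst h; simp at hlen'
        rw [if_neg (by simp [hlen', htvne])]
        show chequeoLoop (contar_columnas f) (f :: ts) tv = _
        rw [chequeoLoop_eq _ _ _ hlen']
        have hmap : ((f :: ts) ++ tv).map (fun fila => ((PySem.Str.count fila "," : Int) + 1))
            = ((PySem.Str.count f "," : Int) + 1)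
              :: (ts ++ tv).map (fun fila => ((PySem.Str.count fila "," : Int) + 1)) := by
          simp
        rw [Bool.eq_iff_iff]
        simp only [hmap, Bool.and_eq_true, List.all_eq_true, beq_iff_eq, decide_eq_true_eq,
          PySem.Set.len, hlen', List.mem_cons]
        have htv0 : tv.length > 0 := by
          cases tv with
          | nil => exact absurd rfl htvne
          | cons _ _ => simp
        have hone : ((List.length (PySem.Set.ofList
              ((((PySem.Str.count f ",") : Int) + 1)
                :: (ts ++ tv).map (fun fila => ((PySem.Str.count fila ",") : Int) + 1)))) : Int) = 1
            ↔ ∀ x ∈ (ts ++ tv).map (fun fila => ((PySem.Str.count fila ",") : Int) + 1),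
                x = ((PySem.Str.count f ",") : Int) + 1 := by
          rw [Nat.cast_eq_one, ofList_len_one_iff]
        rw [hone]
        constructor
        · rintro ⟨hT, hV⟩
          refine ⟨⟨trivial, htv0⟩, ?_⟩
          intro x hx
          obtain ⟨a, ha, rfl⟩ := List.mem_map.1 hx
          rcases List.mem_append.1 ha with ha | ha
          · rw [← contar_eq_width, ← contar_eq_width, hT a (Or.inr ha), hT f (Or.inl rfl)]
          · rw [← contar_eq_width, ← contar_eq_width, hV a ha, hT f (Or.inl rfl)]
        · rintro ⟨-, hset⟩
          constructor
          · rintro a (rfl | ha)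
            · rfl
            · have := hset _ (List.mem_map.2 ⟨a, List.mem_append.2 (Or.inl ha), rfl⟩)
              rw [contar_eq_width a, contar_eq_width f, this]
          · intro b hb
            have := hset _ (List.mem_map.2 ⟨b, List.mem_append.2 (Or.inr hb), rfl⟩)
            rw [contar_eq_width b, contar_eq_width f, this]
  · simp [hlen]
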